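-- pv_equiv track=rewrite | github.com/pypi-data/pypi-mirror-184 | packages/rust-macs/rust_macs-0.3.7.tar.gz/rust_macs-0.3.7/examples/example2.py | check_disjoints
-- ===== SOURCE A (Python) =====
-- def seq_in_list(list, seq):
--     for i in range(len(list) - len(seq) + 1):
--         if list[i:i + len(seq)] == seq:
--             return True
--     return False
--
-- def check_disjoints(best):
--     for j in range(len(best) - 1):
--         for k in range(len(best[j]) - 1):
--             seq = [best[j][k], best[j][k + 1]]
--             # Il faut chercher si la séquence se trouve dans un autre path de best
--             for path in best[j + 1:]:
--                 if seq_in_list(path, seq):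
--                     return False
--     return True
-- ===== SOURCE B (Python) =====
-- def check_disjoints(best):
--     seen = set()
--     for path in reversed(best):
--         pairs = set(zip(path, path[1:]))
--         if not pairs.isdisjoint(seen):
--             return False
--         seen |= pairs
--     return True
-- ===== Notes on version B (the rewrite author's own statement) =====
-- stated objective: faster
-- what changed: Replaces the quadruple-nested scan (each adjacent pair of each path searched by a sliding-window sublist test in every later path) with a single reverse pass that hashes each path's adjacent pairs into a set and tests disjointness against the accumulated pairs of later paths.
import Mathlib
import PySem

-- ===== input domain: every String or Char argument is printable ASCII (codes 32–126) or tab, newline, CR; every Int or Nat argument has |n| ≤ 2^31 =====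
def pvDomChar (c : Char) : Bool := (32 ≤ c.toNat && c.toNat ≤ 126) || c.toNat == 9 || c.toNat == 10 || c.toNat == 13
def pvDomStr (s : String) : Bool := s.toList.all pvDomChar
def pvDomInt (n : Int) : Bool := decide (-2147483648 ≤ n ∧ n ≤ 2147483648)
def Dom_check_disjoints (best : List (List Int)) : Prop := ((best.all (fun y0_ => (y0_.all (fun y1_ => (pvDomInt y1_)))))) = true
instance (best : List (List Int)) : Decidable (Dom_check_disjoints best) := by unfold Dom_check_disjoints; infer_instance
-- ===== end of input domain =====

-- B replaces A's nested rescans (every adjacent pair re-searched in every later path by a sliding window) with one reverse pass over hashed sets of adjacent pairs (objective: faster).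

-- ===== PORT A =====
def seq_in_list (list seq : List Int) : Bool :=
  (PySem.List.pyRange 0 ((list.length : Int) - (seq.length : Int) + 1) 1).any
    (fun i => PySem.List.slice list (some i) (some (i + (seq.length : Int))) == seq)

def check_disjoints (best : List (List Int)) : Bool :=
  !((PySem.List.pyRange 0 ((best.length : Int) - 1) 1).any (fun j =>
      (PySem.List.pyRange 0 (((PySem.List.pyGetD best j []).length : Int) - 1) 1).any (fun k =>
        let seq := [PySem.List.pyGetD (PySem.List.pyGetD best j []) k 0,
                    PySem.List.pyGetD (PySem.List.pyGetD best j []) (k + 1) 0]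
        (PySem.List.slice best (some (j + 1)) none).any (fun path => seq_in_list path seq))))

-- ===== PORT B =====
-- pairs = set(zip(path, path[1:]))
def pvPairs (path : List Int) : PySem.Set (Int × Int) :=
  PySem.Set.ofList (path.zip path.tail)

-- the reverse loop carrying 'seen', with the early return False
def pvAltGo : List (List Int) → PySem.Set (Int × Int) → Bool
  | [], _ => true
  | p :: rest, seen =>
    let pairs := pvPairs p
    if PySem.Set.isdisjoint pairs seen then pvAltGo rest (PySem.Set.union seen pairs)
    else false

def check_disjoints_alt (best : List (List Int)) : Bool :=
  pvAltGo best.reverse PySem.Set.empty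

-- ===== PRECONDITION & SPEC =====
def Spec_check_disjoints (best : List (List Int)) (out : Bool) : Prop := out = check_disjoints_alt best
instance (best : List (List Int)) (out : Bool) : Decidable (Spec_check_disjoints best out) := by unfold Spec_check_disjoints; infer_instance

-- ===== CLAIM (what is proved, stated in full; the proofs are below) =====
def Claim_equal_check_disjoints : Prop := ∀ (best : List (List Int)), Dom_check_disjoints best → Spec_check_disjoints best (check_disjoints best)

-- ===== LEMMAS AND PROOFS =====

-- the adjacent-pair list of a path
def pvZ (l : List Int) : List (Int × Int) := l.zip l.tail

-- the shared characterisation: some adjacent pair occurs in two distinct paths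
def pvBad (best : List (List Int)) : Prop :=
  ∃ j k : Nat, ∃ hjk : j < k, ∃ hk : k < best.length,
    ∃ q, q ∈ pvZ (best[j]'(Nat.lt_trans hjk hk)) ∧ q ∈ pvZ best[k]

lemma pv_zip (path : List Int) (a b : Int) :
    (a, b) ∈ pvZ path ↔ ∃ m : Nat, ∃ h : m + 1 < path.length, path[m] = a ∧ path[m+1] = b := by
  rw [pvZ, List.mem_iff_getElem]
  constructor
  · rintro ⟨i, hi, hE⟩
    have hi' : i + 1 < path.length := by
      simp [List.length_zip, List.length_tail] at hi; omega
    rw [List.getElem_zip] at hE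
    simp [List.getElem_tail] at hE
    exact ⟨i, hi', hE.1, hE.2⟩
  · rintro ⟨m, h, ha, hb⟩
    refine ⟨m, ?_, ?_⟩
    · simp [List.length_zip, List.length_tail]; omega
    · rw [List.getElem_zip]; simp [List.getElem_tail, ha, hb]

lemma pv_take2_drop (path : List Int) (m : Nat) (a b : Int) :
    (path.drop m).take 2 = [a, b] ↔ ∃ h : m + 1 < path.length, path[m] = a ∧ path[m+1] = b := by
  induction path generalizing m with
  | nil => simp
  | cons x xs ih =>
    cases m with
    | zero =>
      cases xs with
      | nil => simp
      | cons y ys => simp [List.take]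
    | succ n =>
      simp only [List.drop_succ_cons, ih, List.length_cons]
      constructor
      · rintro ⟨h, ha, hb⟩; exact ⟨by omega, by simpa using ha, by simpa using hb⟩
      · rintro ⟨h, ha, hb⟩; exact ⟨by omega, by simpa using ha, by simpa using hb⟩

lemma pv_seq (path : List Int) (a b : Int) :
    seq_in_list path [a, b] = true ↔ (a, b) ∈ pvZ path := by
  rw [pv_zip]
  simp only [seq_in_list, List.any_eq_true, PySem.List.mem_pyRange_one, List.length_cons,
    List.length_nil, beq_iff_eq]
  constructor
  · rintro ⟨i, ⟨h0, hlt⟩, hs⟩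
    rw [PySem.List.slice_toNat _ h0 (by omega)] at hs
    have h2 : (i + ((0+1+1 : Nat) : Int)).toNat - i.toNat = 2 := by omega
    rw [h2] at hs
    rw [pv_take2_drop] at hs
    exact ⟨i.toNat, hs⟩
  · rintro ⟨m, h, ha, hb⟩
    refine ⟨(m : Int), ⟨by omega, by omega⟩, ?_⟩
    rw [PySem.List.slice_toNat _ (by omega) (by omega)]
    have h2 : ((m : Int) + ((0+1+1 : Nat) : Int)).toNat - (m : Int).toNat = 2 := by omega
    rw [h2]
    simp only [Int.toNat_natCast]
    rw [pv_take2_drop]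
    exact ⟨h, ha, hb⟩

lemma pv_A_false (best : List (List Int)) : check_disjoints best = false ↔ pvBad best := by
  rw [check_disjoints, Bool.not_eq_false']
  simp only [List.any_eq_true, PySem.List.mem_pyRange_one]
  constructor
  · rintro ⟨jI, ⟨hj0, hjlt⟩, kI, ⟨hk0, hklt⟩, path, hpmem, hseq⟩
    rw [PySem.List.pyGetD_eq_getElem best [] hj0 (by omega)] at hklt hseq
    rw [PySem.List.slice_from best (by omega)] at hpmem
    rw [List.mem_iff_getElem] at hpmem
    obtain ⟨i, hi, hpath⟩ := hpmem
    rw [List.getElem_drop] at hpath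
    simp only [List.length_drop] at hi
    rw [PySem.List.pyGetD_eq_getElem _ 0 hk0 (by omega)] at hseq
    rw [PySem.List.pyGetD_eq_getElem _ 0 (by omega) (by omega)] at hseq
    rw [pv_seq, pv_zip] at hseq
    obtain ⟨m, hm, ha, hb⟩ := hseq
    refine ⟨jI.toNat, (jI+1).toNat + i, by omega, by omega, (path[m], path[m+1]), ?_, ?_⟩
    · rw [pv_zip]
      have hkk : (kI + 1).toNat = kI.toNat + 1 := by omega
      simp only [hkk] at hb
      exact ⟨kI.toNat, by omega, ha.symm, hb.symm⟩
    · rw [hpath, pv_zip]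
      exact ⟨m, hm, rfl, rfl⟩
  · rintro ⟨j, k, hjk, hk, ⟨a, b⟩, hqj, hqk⟩
    rw [pv_zip] at hqj
    obtain ⟨m, hm, ha, hb⟩ := hqj
    refine ⟨(j : Int), ⟨by omega, by omega⟩, (m : Int), ?_, best[k], ?_, ?_⟩
    · rw [PySem.List.pyGetD_eq_getElem best [] (by omega) (by omega)]
      simp only [Int.toNat_natCast]
      constructor
      · omega
      · omega
    · rw [PySem.List.slice_from best (by omega)]
      rw [List.mem_iff_getElem]
      refine ⟨k - (j+1), by simp [List.length_drop]; omega, ?_⟩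
      rw [List.getElem_drop]
      congr 1
      omega
    · rw [PySem.List.pyGetD_eq_getElem best [] (by omega) (by omega)]
      simp only [Int.toNat_natCast]
      rw [PySem.List.pyGetD_eq_getElem _ 0 (by omega) (by omega)]
      rw [PySem.List.pyGetD_eq_getElem _ 0 (by omega) (by omega)]
      have h1 : ((m : Int) + 1).toNat = m + 1 := by omega
      simp only [Int.toNat_natCast, h1, ha, hb]
      rw [pv_seq]
      exact hqk

-- what the reverse loop detects: a pair of some remaining path seen earlier (in 'seen' or in a previous element)
def pvHit (l : List (List Int)) (seen : PySem.Set (Int × Int)) : Prop :=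
  ∃ i : Nat, ∃ hi : i < l.length, ∃ q, q ∈ pvZ l[i] ∧
    (q ∈ seen ∨ ∃ j : Nat, ∃ hj : j < i, q ∈ pvZ (l[j]'(Nat.lt_trans hj hi)))

lemma pv_altGo_false (l : List (List Int)) (seen : PySem.Set (Int × Int)) :
    pvAltGo l seen = false ↔ pvHit l seen := by
  induction l generalizing seen with
  | nil => simp [pvAltGo, pvHit]
  | cons p rest ih =>
    rw [pvAltGo]
    by_cases hd : PySem.Set.isdisjoint (pvPairs p) seen = true
    · rw [if_pos hd, ih]
      rw [PySem.Set.isdisjoint_iff] at hd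
      constructor
      · rintro ⟨i, hi, q, hq, hcase⟩
        refine ⟨i + 1, by simpa using Nat.succ_lt_succ hi, q, by simpa using hq, ?_⟩
        rcases hcase with hseen | ⟨j, hj, hmem⟩
        · rcases (PySem.Set.mem_union _ _ _).mp hseen with h | h
          · exact Or.inl h
          · exact Or.inr ⟨0, by omega, by simpa [pvPairs, PySem.Set.mem_ofList, pvZ] using h⟩
        · exact Or.inr ⟨j + 1, by omega, by simpa using hmem⟩
      · rintro ⟨i, hi, q, hq, hcase⟩
        cases i with
        | zero =>
          simp only [List.getElem_cons_zero] at hq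
          rcases hcase with hseen | ⟨j, hj, _⟩
          · exact absurd hseen (hd q (by simpa [pvPairs, PySem.Set.mem_ofList, pvZ] using hq))
          · omega
        | succ n =>
          refine ⟨n, by simpa using Nat.lt_of_succ_lt_succ hi, q, by simpa using hq, ?_⟩
          rcases hcase with hseen | ⟨j, hj, hmem⟩
          · exact Or.inl ((PySem.Set.mem_union _ _ _).mpr (Or.inl hseen))
          · cases j with
            | zero =>
              refine Or.inl ((PySem.Set.mem_union _ _ _).mpr (Or.inr ?_))
              simpa [pvPairs, PySem.Set.mem_ofList, pvZ] using hmem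
            | succ jm => exact Or.inr ⟨jm, by omega, by simpa using hmem⟩
    · rw [if_neg hd]
      rw [PySem.Set.isdisjoint_iff] at hd
      push Not at hd
      constructor
      · intro _
        obtain ⟨q, hqp, hqs⟩ := hd
        exact ⟨0, by simp, q, by simpa [pvPairs, PySem.Set.mem_ofList, pvZ] using hqp, Or.inl hqs⟩
      · intro _; rfl

lemma pv_B_false (best : List (List Int)) : check_disjoints_alt best = false ↔ pvBad best := by
  rw [check_disjoints_alt, pv_altGo_false]
  constructor
  · rintro ⟨i, hi, q, hq, hcase⟩
    rcases hcase with hseen | ⟨j, hj, hmem⟩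
    · simp [PySem.Set.empty] at hseen
    · rw [List.length_reverse] at hi
      rw [List.getElem_reverse] at hq hmem
      exact ⟨best.length - 1 - i, best.length - 1 - j, by omega, by omega, q, hq, hmem⟩
  · rintro ⟨j, k, hjk, hk, q, hqj, hqk⟩
    refine ⟨best.length - 1 - j, by rw [List.length_reverse]; omega, q, ?_,
      Or.inr ⟨best.length - 1 - k, by omega, ?_⟩⟩
    · rw [List.getElem_reverse]
      have hj' : best.length - 1 - (best.length - 1 - j) = j := by omega
      simp only [hj']
      exact hqj
    · rw [List.getElem_reverse]
      have hk' : best.length - 1 - (best.length - 1 - k) = k := by omega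
      simp only [hk']
      exact hqk

-- ===== VERDICT (by name: the statement is the Claim_ definition above) =====
theorem check_disjoints_spec : Claim_equal_check_disjoints := by
  intro best _
  unfold Spec_check_disjoints
  have hA := pv_A_false best
  have hB := pv_B_false best
  cases hA' : check_disjoints best <;> cases hB' : check_disjoints_alt best <;> simp_all
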